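-- pv_equiv track=rewrite | github.com/sergioMRSD/CLFS | Team's_work/ZW_clfs_pipeline.py | classify_place
-- ===== SOURCE A (Python) =====
-- def classify_place(p: str):
--     pl = p.lower()
--     if 'outside' in pl:
--         return 'outside'
--     if any(x in pl for x in ['university', 'nus', 'ntu', 'smu', 'nanyang']):
--         return 'university'
--     if 'polytechnic' in pl or 'poly' in pl:
--         return 'polytechnic'
--     if any(x in pl for x in ['ite', 'nitec']):
--         return 'ite'
--     if 'local polytechnics' in pl:
--         return 'polytechnic'
--     return 'other'
-- ===== SOURCE B (Python) =====
-- KW = [('outside', 0), ('university', 1), ('nus', 1), ('ntu', 1), ('smu', 1),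
--       ('nanyang', 1), ('polytechnic', 2), ('poly', 2), ('ite', 3), ('nitec', 3)]
-- CATS = ['outside', 'university', 'polytechnic', 'ite', 'other']
--
-- def classify_place(p: str):
--     pl = p.lower()
--     best = 4
--     for i in range(len(pl) + 1):
--         for kw, r in KW:
--             if pl.startswith(kw, i):
--                 best = min(best, r)
--     return CATS[best]
-- ===== Notes on version B (the rewrite author's own statement) =====
-- stated objective: alternative
-- what changed: Replaces A's ordered cascade of substring membership tests with a single positional sweep over the lowered string that records the minimal matched category rank in an accumulator and indexes a category table with it.
import Mathlib
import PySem

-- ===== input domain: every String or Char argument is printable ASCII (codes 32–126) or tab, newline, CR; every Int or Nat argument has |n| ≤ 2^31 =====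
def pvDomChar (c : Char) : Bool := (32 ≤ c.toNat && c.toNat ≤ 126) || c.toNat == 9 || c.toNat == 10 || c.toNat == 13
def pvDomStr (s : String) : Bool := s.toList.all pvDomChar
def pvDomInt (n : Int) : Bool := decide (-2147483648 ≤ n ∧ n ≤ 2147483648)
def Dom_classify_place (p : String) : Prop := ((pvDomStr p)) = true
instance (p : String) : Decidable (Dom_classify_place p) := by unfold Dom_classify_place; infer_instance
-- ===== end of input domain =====

-- B replaces A's ordered cascade of substring tests by a single positional sweep that
-- tracks the minimal matched category rank (alternative decomposition, same behaviour).


-- ===== PORT A =====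
def classify_place (p : String) : String :=
  let pl := PySem.Str.lower p
  if PySem.Str.isIn "outside" pl then "outside"
  else if ["university", "nus", "ntu", "smu", "nanyang"].any (fun x => PySem.Str.isIn x pl) then "university"
  else if PySem.Str.isIn "polytechnic" pl || PySem.Str.isIn "poly" pl then "polytechnic"
  else if ["ite", "nitec"].any (fun x => PySem.Str.isIn x pl) then "ite"
  else if PySem.Str.isIn "local polytechnics" pl then "polytechnic"
  else "other"

-- ===== PORT B =====
-- keyword → category-rank table and the rank → category table of Source B
def kwTable : List (List Char × Nat) :=
  [("outside".toList, 0),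
   ("university".toList, 1), ("nus".toList, 1), ("ntu".toList, 1), ("smu".toList, 1), ("nanyang".toList, 1),
   ("polytechnic".toList, 2), ("poly".toList, 2),
   ("ite".toList, 3), ("nitec".toList, 3)]

def catTable : List String := ["outside", "university", "polytechnic", "ite", "other"]

-- the two nested for-loops of Source B: sweep positions 0..len(pl), keeping the minimal matched rank;
-- Python's pl.startswith(kw, i) with 0 ≤ i ≤ len(pl) is exactly Chars.startswith (pl.drop i) kw
def bestOf (pl : List Char) : Nat :=
  (List.range (pl.length + 1)).foldl
    (fun best i =>
      kwTable.foldl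
        (fun best kr => if PySem.Chars.startswith (pl.drop i) kr.1 then min best kr.2 else best)
        best)
    4

def classify_place_alt (p : String) : String :=
  let pl := (PySem.Str.lower p).toList
  let best := bestOf pl
  -- CATS[best]: best is always ≤ 4 < len(CATS), so plain indexing is exact
  catTable.getD best "other"

-- ===== PRECONDITION & SPEC =====
def Spec_classify_place (p : String) (out : String) : Prop := out = classify_place_alt p
instance (p : String) (out : String) : Decidable (Spec_classify_place p out) := by unfold Spec_classify_place; infer_instance

-- ===== CLAIM (what is proved, stated in full; the proofs are below) =====
def Claim_equal_classify_place : Prop := ∀ (p : String), Dom_classify_place p → Spec_classify_place p (classify_place p)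

-- ===== LEMMAS AND PROOFS =====

-- inner loop: a min-fold over the keyword table, characterized
theorem inner_char (L : List Char) (i : Nat) (l : List (List Char × Nat)) (b : Nat) :
    (l.foldl (fun b kr => if PySem.Chars.startswith (L.drop i) kr.1 then min b kr.2 else b) b) ≤ b ∧
    (∀ kr ∈ l, PySem.Chars.startswith (L.drop i) kr.1 = true →
      (l.foldl (fun b kr => if PySem.Chars.startswith (L.drop i) kr.1 then min b kr.2 else b) b) ≤ kr.2) ∧
    ((l.foldl (fun b kr => if PySem.Chars.startswith (L.drop i) kr.1 then min b kr.2 else b) b) = b ∨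
      ∃ kr ∈ l, PySem.Chars.startswith (L.drop i) kr.1 = true ∧
        (l.foldl (fun b kr => if PySem.Chars.startswith (L.drop i) kr.1 then min b kr.2 else b) b) = kr.2) := by
  induction l generalizing b with
  | nil => simp
  | cons hd tl ih =>
    simp only [List.foldl_cons]
    by_cases hs : PySem.Chars.startswith (L.drop i) hd.1 = true
    · rw [if_pos hs]
      obtain ⟨h1, h2, h3⟩ := ih (min b hd.2)
      refine ⟨by omega, ?_, ?_⟩
      · intro kr hkr hsw
        rcases List.mem_cons.mp hkr with h | h
        · subst h; omega
        · exact h2 kr h hsw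
      · rcases h3 with h | ⟨kr, hkr, hsw, heq⟩
        · rcases Nat.lt_or_ge hd.2 b with hlt | hge
          · exact Or.inr ⟨hd, List.mem_cons_self .., hs, by omega⟩
          · exact Or.inl (by omega)
        · exact Or.inr ⟨kr, List.mem_cons_of_mem _ hkr, hsw, heq⟩
    · rw [if_neg hs]
      obtain ⟨h1, h2, h3⟩ := ih b
      refine ⟨h1, ?_, ?_⟩
      · intro kr hkr hsw
        rcases List.mem_cons.mp hkr with h | h
        · subst h; exact absurd hsw hs
        · exact h2 kr h hsw
      · rcases h3 with h | ⟨kr, hkr, hsw, heq⟩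
        · exact Or.inl h
        · exact Or.inr ⟨kr, List.mem_cons_of_mem _ hkr, hsw, heq⟩

-- outer loop: sweeping the positions, same characterization
theorem outer_char (L : List Char) (l : List Nat) (b : Nat) :
    (l.foldl (fun b i => kwTable.foldl
        (fun b kr => if PySem.Chars.startswith (L.drop i) kr.1 then min b kr.2 else b) b) b) ≤ b ∧
    (∀ i ∈ l, ∀ kr ∈ kwTable, PySem.Chars.startswith (L.drop i) kr.1 = true →
      (l.foldl (fun b i => kwTable.foldl
        (fun b kr => if PySem.Chars.startswith (L.drop i) kr.1 then min b kr.2 else b) b) b) ≤ kr.2) ∧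
    ((l.foldl (fun b i => kwTable.foldl
        (fun b kr => if PySem.Chars.startswith (L.drop i) kr.1 then min b kr.2 else b) b) b) = b ∨
      ∃ i ∈ l, ∃ kr ∈ kwTable, PySem.Chars.startswith (L.drop i) kr.1 = true ∧
        (l.foldl (fun b i => kwTable.foldl
          (fun b kr => if PySem.Chars.startswith (L.drop i) kr.1 then min b kr.2 else b) b) b) = kr.2) := by
  induction l generalizing b with
  | nil => simp
  | cons hd tl ih =>
    simp only [List.foldl_cons]
    obtain ⟨s1, s2, s3⟩ := inner_char L hd kwTable b
    obtain ⟨h1, h2, h3⟩ := ih (kwTable.foldl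
      (fun b kr => if PySem.Chars.startswith (L.drop hd) kr.1 then min b kr.2 else b) b)
    refine ⟨le_trans h1 s1, ?_, ?_⟩
    · intro i hi kr hkr hsw
      rcases List.mem_cons.mp hi with h | h
      · subst h; exact le_trans h1 (s2 kr hkr hsw)
      · exact h2 i h kr hkr hsw
    · rcases h3 with h | ⟨i, hi, kr, hkr, hsw, heq⟩
      · rw [h]
        rcases s3 with h' | ⟨kr, hkr, hsw, heq⟩
        · exact Or.inl h'
        · exact Or.inr ⟨hd, List.mem_cons_self .., kr, hkr, hsw, heq⟩
      · exact Or.inr ⟨i, List.mem_cons_of_mem _ hi, kr, hkr, hsw, heq⟩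

theorem isIn_of_startswith (L kw : List Char) (i : Nat)
    (h : PySem.Chars.startswith (L.drop i) kw = true) : PySem.Chars.isIn kw L = true :=
  (PySem.Chars.exists_prefix_drop_iff_isIn kw L).mp ⟨i, (PySem.Chars.startswith_iff _ _).mp h⟩

theorem exists_range_of_isIn (L kw : List Char) (h : PySem.Chars.isIn kw L = true) :
    ∃ i ∈ List.range (L.length + 1), PySem.Chars.startswith (L.drop i) kw = true := by
  obtain ⟨j, hj⟩ := (PySem.Chars.exists_prefix_drop_iff_isIn kw L).mpr h
  by_cases hle : j ≤ L.length
  · exact ⟨j, List.mem_range.mpr (by omega), (PySem.Chars.startswith_iff _ _).mpr hj⟩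
  · refine ⟨L.length, List.mem_range.mpr (by omega), (PySem.Chars.startswith_iff _ _).mpr ?_⟩
    rw [List.drop_length]
    rwa [List.drop_eq_nil_of_le (by omega)] at hj

theorem bestOf_rank (L : List Char) (r : Nat)
    (hup : ∃ kr ∈ kwTable, kr.2 = r ∧ PySem.Chars.isIn kr.1 L = true)
    (hlow : ∀ kr ∈ kwTable, PySem.Chars.isIn kr.1 L = true → r ≤ kr.2) :
    bestOf L = r := by
  obtain ⟨h1, h2, h3⟩ := outer_char L (List.range (L.length + 1)) 4
  obtain ⟨kr, hkr, hr, hin⟩ := hup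
  obtain ⟨i, hi, hsw⟩ := exists_range_of_isIn L kr.1 hin
  have hble : bestOf L ≤ r := hr ▸ h2 i hi kr hkr hsw
  have hr3 : r ≤ 3 := by
    subst hr
    simp only [kwTable, List.mem_cons, List.not_mem_nil, or_false] at hkr
    rcases hkr with rfl | rfl | rfl | rfl | rfl | rfl | rfl | rfl | rfl | rfl <;> simp
  rcases h3 with h | ⟨i', _, kr', hkr', hsw', heq⟩
  · change bestOf L = 4 at h; omega
  · have : r ≤ kr'.2 := hlow kr' hkr' (isIn_of_startswith L kr'.1 i' hsw')
    change bestOf L = kr'.2 at heq; omega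

theorem bestOf_none (L : List Char)
    (h : ∀ kr ∈ kwTable, PySem.Chars.isIn kr.1 L = false) : bestOf L = 4 := by
  obtain ⟨_, _, h3⟩ := outer_char L (List.range (L.length + 1)) 4
  rcases h3 with h' | ⟨i, _, kr, hkr, hsw, _⟩
  · exact h'
  · have := h kr hkr
    rw [isIn_of_startswith L kr.1 i hsw] at this
    exact Bool.noConfusion this

-- "poly" is a substring of "local polytechnics": A's fifth branch is unreachable
theorem poly_of_localpoly (L : List Char)
    (h : PySem.Chars.isIn "local polytechnics".toList L = true) :
    PySem.Chars.isIn "poly".toList L = true := by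
  rw [PySem.Chars.isIn_iff_infix] at h ⊢
  exact List.IsInfix.trans (by decide) h

-- ===== VERDICT (by name: the statement is the Claim_ definition above) =====
theorem classify_place_spec : Claim_equal_classify_place := by
  intro p _
  show classify_place p = classify_place_alt p
  simp only [classify_place, classify_place_alt, PySem.Str.isIn_eq, PySem.Str.toList_lower,
    List.any_cons, List.any_nil, Bool.or_false]
  set L := PySem.Chars.lower p.toList with hL
  by_cases c0 : PySem.Chars.isIn "outside".toList L = true
  · rw [if_pos c0, bestOf_rank L 0 ⟨("outside".toList, 0), by simp [kwTable], rfl, c0⟩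
      (by intro kr _ _; omega)]
    rfl
  · rw [if_neg c0]
    rw [Bool.not_eq_true] at c0
    by_cases c1 : (PySem.Chars.isIn "university".toList L || PySem.Chars.isIn "nus".toList L ||
        PySem.Chars.isIn "ntu".toList L || PySem.Chars.isIn "smu".toList L ||
        PySem.Chars.isIn "nanyang".toList L) = true
    · rw [if_pos (by simpa [Bool.or_assoc] using c1)]
      simp only [Bool.or_eq_true] at c1
      have hup : ∃ kr ∈ kwTable, kr.2 = 1 ∧ PySem.Chars.isIn kr.1 L = true := by
        rcases c1 with ((((h | h) | h) | h) | h)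
        · exact ⟨("university".toList, 1), by simp [kwTable], rfl, h⟩
        · exact ⟨("nus".toList, 1), by simp [kwTable], rfl, h⟩
        · exact ⟨("ntu".toList, 1), by simp [kwTable], rfl, h⟩
        · exact ⟨("smu".toList, 1), by simp [kwTable], rfl, h⟩
        · exact ⟨("nanyang".toList, 1), by simp [kwTable], rfl, h⟩
      rw [bestOf_rank L 1 hup (by
        intro kr hkr hin
        simp only [kwTable, List.mem_cons, List.not_mem_nil, or_false] at hkr
        rcases hkr with rfl | rfl | rfl | rfl | rfl | rfl | rfl | rfl | rfl | rfl <;> simp_all)]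
      rfl
    · rw [if_neg (by simpa [Bool.or_assoc] using c1)]
      simp only [Bool.or_eq_true, not_or] at c1
      obtain ⟨⟨⟨⟨c1a, c1b⟩, c1c⟩, c1d⟩, c1e⟩ := c1
      rw [Bool.not_eq_true] at c1a c1b c1c c1d c1e
      by_cases c2 : (PySem.Chars.isIn "polytechnic".toList L ||
          PySem.Chars.isIn "poly".toList L) = true
      · rw [if_pos c2]
        simp only [Bool.or_eq_true] at c2
        have hup : ∃ kr ∈ kwTable, kr.2 = 2 ∧ PySem.Chars.isIn kr.1 L = true := by
          rcases c2 with h | h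
          · exact ⟨("polytechnic".toList, 2), by simp [kwTable], rfl, h⟩
          · exact ⟨("poly".toList, 2), by simp [kwTable], rfl, h⟩
        rw [bestOf_rank L 2 hup (by
        intro kr hkr hin
        simp only [kwTable, List.mem_cons, List.not_mem_nil, or_false] at hkr
        rcases hkr with rfl | rfl | rfl | rfl | rfl | rfl | rfl | rfl | rfl | rfl <;> simp_all)]
        rfl
      · rw [if_neg c2]
        simp only [Bool.or_eq_true, not_or] at c2
        obtain ⟨c2a, c2b⟩ := c2
        rw [Bool.not_eq_true] at c2a c2b
        by_cases c3 : (PySem.Chars.isIn "ite".toList L ||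
            PySem.Chars.isIn "nitec".toList L) = true
        · rw [if_pos c3]
          simp only [Bool.or_eq_true] at c3
          have hup : ∃ kr ∈ kwTable, kr.2 = 3 ∧ PySem.Chars.isIn kr.1 L = true := by
            rcases c3 with h | h
            · exact ⟨("ite".toList, 3), by simp [kwTable], rfl, h⟩
            · exact ⟨("nitec".toList, 3), by simp [kwTable], rfl, h⟩
          rw [bestOf_rank L 3 hup (by
        intro kr hkr hin
        simp only [kwTable, List.mem_cons, List.not_mem_nil, or_false] at hkr
        rcases hkr with rfl | rfl | rfl | rfl | rfl | rfl | rfl | rfl | rfl | rfl <;> simp_all)]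
          rfl
        · rw [if_neg c3]
          simp only [Bool.or_eq_true, not_or] at c3
          obtain ⟨c3a, c3b⟩ := c3
          rw [Bool.not_eq_true] at c3a c3b
          have c4 : ¬ PySem.Chars.isIn "local polytechnics".toList L = true := by
            intro h
            have := poly_of_localpoly L h
            rw [c2b] at this; exact absurd this (by simp)
          rw [if_neg c4]
          rw [bestOf_none L (by
            intro kr hkr
            simp only [kwTable, List.mem_cons, List.not_mem_nil, or_false] at hkr
            rcases hkr with rfl | rfl | rfl | rfl | rfl | rfl | rfl | rfl | rfl | rfl <;> assumption)]
          rfl
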